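-- pv_equiv track=rewrite | github.com/stasia-zal/prg-basics | 04-Functions/7.6/cardnum.py | hide
-- ===== SOURCE A (Python) =====
-- def hide(card_number):
--     num=1
--     cardnew=''
--     for i in card_number:
--         if num==1 or num==2 or num==13 or num==14 or num==15 or num==16:
--             cardnew+=i
--         else:
--             cardnew+='*'
--         num+=1
--     return cardnew
-- ===== SOURCE B (Python) =====
-- def hide(card_number):
--     return (card_number[:2]
--             + '*' * len(card_number[2:12])
--             + card_number[12:16]
--             + '*' * len(card_number[16:]))
-- ===== Notes on version B (the rewrite author's own statement) =====
-- stated objective: simpler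
-- what changed: Replaced the per-character loop with a position counter by a single concatenation of four fixed slices, the masked slices rendered as star runs sized by their lengths.
import Mathlib
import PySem

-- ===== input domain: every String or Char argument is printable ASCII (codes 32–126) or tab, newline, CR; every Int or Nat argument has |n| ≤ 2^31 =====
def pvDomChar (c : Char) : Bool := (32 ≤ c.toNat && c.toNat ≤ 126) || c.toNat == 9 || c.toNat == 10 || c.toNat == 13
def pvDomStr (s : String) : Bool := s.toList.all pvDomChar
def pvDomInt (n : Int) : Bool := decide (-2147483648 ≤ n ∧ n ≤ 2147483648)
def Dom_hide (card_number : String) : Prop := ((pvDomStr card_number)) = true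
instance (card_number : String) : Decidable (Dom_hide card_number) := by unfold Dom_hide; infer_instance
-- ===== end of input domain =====

-- B replaces A's per-character loop (position counter + branch) by a concatenation
-- of fixed slices with '*'-runs sized by the masked slices; objective: simpler.

-- ===== PORT A =====
-- A's loop: counter num starting at 1, string accumulator (kept as List Char).
def hide (card_number : String) : String :=
  let r := card_number.toList.foldl
    (fun (p : Int × List Char) i =>
      if p.1 == 1 || p.1 == 2 || p.1 == 13 || p.1 == 14 || p.1 == 15 || p.1 == 16
      then (p.1 + 1, p.2 ++ [i])
      else (p.1 + 1, p.2 ++ ['*']))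
    (1, [])
  String.mk r.2

-- ===== PORT B =====
def hide_alt (card_number : String) : String :=
  let l := card_number.toList
  String.mk (PySem.List.slice l none (some 2)
    ++ List.replicate (PySem.List.slice l (some 2) (some 12)).length '*'
    ++ PySem.List.slice l (some 12) (some 16)
    ++ List.replicate (PySem.List.slice l (some 16) none).length '*')

-- ===== PRECONDITION & SPEC =====
def Spec_hide (card_number : String) (out : String) : Prop := out = hide_alt card_number
instance (card_number : String) (out : String) : Decidable (Spec_hide card_number out) := by unfold Spec_hide; infer_instance

-- ===== CLAIM (what is proved, stated in full; the proofs are below) =====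
def Claim_equal_hide : Prop := ∀ (card_number : String), Dom_hide card_number → Spec_hide card_number (hide card_number)

-- ===== LEMMAS AND PROOFS =====

def pvKeep (n : Int) : Bool := n == 1 || n == 2 || n == 13 || n == 14 || n == 15 || n == 16

-- A's loop, as a structural recursion carrying the counter.
def pvMask (n : Int) : List Char → List Char
  | [] => []
  | c :: t => (if pvKeep n then c else '*') :: pvMask (n + 1) t

theorem pvMask_foldl (l : List Char) : ∀ (n : Int) (a : List Char),
    (l.foldl (fun (p : Int × List Char) i =>
      if p.1 == 1 || p.1 == 2 || p.1 == 13 || p.1 == 14 || p.1 == 15 || p.1 == 16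
      then (p.1 + 1, p.2 ++ [i]) else (p.1 + 1, p.2 ++ ['*'])) (n, a)).2
    = a ++ pvMask n l := by
  induction l with
  | nil => intro n a; simp [pvMask]
  | cons c t ih =>
    intro n a
    rw [List.foldl_cons]
    by_cases h : (n == 1 || n == 2 || n == 13 || n == 14 || n == 15 || n == 16) = true
    · rw [if_pos h, ih]
      simp [pvMask, pvKeep, h]
    · rw [if_neg h, ih]
      simp [pvMask, pvKeep, h]

theorem pvMask_append (a b : List Char) : ∀ n : Int,
    pvMask n (a ++ b) = pvMask n a ++ pvMask (n + a.length) b := by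
  induction a with
  | nil => intro n; simp [pvMask]
  | cons c t ih =>
    intro n
    simp only [List.cons_append, pvMask, ih, List.length_cons]
    congr 2
    push_cast
    ring_nf

theorem pvMask_keep (a : List Char) : ∀ n : Int,
    (∀ m : Int, n ≤ m → m < n + a.length → pvKeep m = true) → pvMask n a = a := by
  induction a with
  | nil => intro n _; simp [pvMask]
  | cons c t ih =>
    intro n h
    simp only [pvMask]
    rw [h n le_rfl (by simp only [List.length_cons]; push_cast; omega), ih (n + 1)]
    · simp
    · intro m h1 h2
      refine h m (by omega) ?_
      simp only [List.length_cons]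
      push_cast
      omega

theorem pvMask_star (a : List Char) : ∀ n : Int,
    (∀ m : Int, n ≤ m → m < n + a.length → pvKeep m = false) →
    pvMask n a = List.replicate a.length '*' := by
  induction a with
  | nil => intro n _; simp [pvMask]
  | cons c t ih =>
    intro n h
    simp only [pvMask, List.length_cons, List.replicate_succ]
    rw [h n le_rfl (by simp only [List.length_cons]; push_cast; omega), ih (n + 1)]
    · simp
    · intro m h1 h2
      refine h m (by omega) ?_
      simp only [List.length_cons]
      push_cast
      omega

theorem pvMask_main (l : List Char) :
    pvMask 1 l = l.take 2 ++ List.replicate ((l.drop 2).take 10).length '*'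
      ++ ((l.drop 12).take 4 ++ List.replicate (l.drop 16).length '*') := by
  have hdecomp : l = l.take 2 ++ ((l.drop 2).take 10 ++ ((l.drop 12).take 4 ++ l.drop 16)) := by
    have h1 : (l.drop 12).take 4 ++ l.drop 16 = l.drop 12 := by
      have := List.take_append_drop 4 (l.drop 12)
      simpa [List.drop_drop] using this
    have h2 : (l.drop 2).take 10 ++ l.drop 12 = l.drop 2 := by
      have := List.take_append_drop 10 (l.drop 2)
      simpa [List.drop_drop] using this
    rw [h1, h2, List.take_append_drop]
  conv_lhs => rw [hdecomp]
  rw [pvMask_append, pvMask_append, pvMask_append]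
  rw [pvMask_keep (l.take 2) 1 (by
        intro m h1 h2
        simp only [List.length_take] at h2
        simp [pvKeep]
        omega),
      pvMask_star ((l.drop 2).take 10) _ (by
        intro m h1 h2
        simp only [List.length_take, List.length_drop] at h1 h2 ⊢
        simp [pvKeep]
        push_cast at h1 h2
        omega),
      pvMask_keep ((l.drop 12).take 4) _ (by
        intro m h1 h2
        simp only [List.length_take, List.length_drop] at h1 h2 ⊢
        simp [pvKeep]
        push_cast at h1 h2
        omega),
      pvMask_star (l.drop 16) _ (by
        intro m h1 h2
        simp only [List.length_take, List.length_drop] at h1 h2 ⊢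
        simp [pvKeep]
        push_cast at h1 h2
        omega)]
  simp [List.append_assoc]

theorem pvSlices (l : List Char) :
    PySem.List.slice l none (some 2) = l.take 2
    ∧ PySem.List.slice l (some 2) (some 12) = (l.drop 2).take 10
    ∧ PySem.List.slice l (some 12) (some 16) = (l.drop 12).take 4
    ∧ PySem.List.slice l (some 16) none = l.drop 16 := by
  refine ⟨?_, ?_, ?_, ?_⟩
  · rw [PySem.List.slice_to l (by norm_num)]; rfl
  · rw [PySem.List.slice_toNat l (by norm_num) (by norm_num)]; rfl
  · rw [PySem.List.slice_toNat l (by norm_num) (by norm_num)]; rfl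
  · rw [PySem.List.slice_from l (by norm_num)]; rfl

-- ===== VERDICT (by name: the statement is the Claim_ definition above) =====
theorem hide_spec : Claim_equal_hide := by
  intro s _
  unfold Spec_hide hide hide_alt
  obtain ⟨e1, e2, e3, e4⟩ := pvSlices s.toList
  simp only [e1, e2, e3, e4]
  rw [pvMask_foldl s.toList 1 []]
  simp only [List.nil_append]
  rw [pvMask_main]
  simp [List.append_assoc]
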